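-- pv_equiv track=rewrite | github.com/alok1974/pychess | src/pychess/gui/widgets.py | _is_neigbour
-- ===== SOURCE A (Python) =====
-- def _is_neigbour(square, squares):
--     if square[0] in [s[0] for s in squares]:
--         for y in [s[1] for s in squares]:
--             if square[1] in (y - 1, y + 1):
--                 return True
--     if square[1] in [s[1] for s in squares]:
--         for x in [s[0] for s in squares]:
--             if square[0] in (x - 1, x + 1):
--                 return True
--     return False
-- ===== SOURCE B (Python) =====
-- def _is_neigbour(square, squares):
--     x, y = square[0], square[1]
--     xm = ym = xn = yn = False
--     for s in squares:
--         xm = xm or s[0] == x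
--         ym = ym or s[1] == y
--         xn = xn or abs(s[0] - x) == 1
--         yn = yn or abs(s[1] - y) == 1
--         if (xm and yn) or (ym and xn):
--             return True
--     return False
-- ===== Notes on version B (the rewrite author's own statement) =====
-- stated objective: alternative
-- what changed: Replaces A's four staged comprehension passes and two nested membership/scan blocks with a single pass over squares maintaining four boolean flags (column match, row match, column neighbour, row neighbour) and an early exit once the adjacency condition is decided.
import Mathlib
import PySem

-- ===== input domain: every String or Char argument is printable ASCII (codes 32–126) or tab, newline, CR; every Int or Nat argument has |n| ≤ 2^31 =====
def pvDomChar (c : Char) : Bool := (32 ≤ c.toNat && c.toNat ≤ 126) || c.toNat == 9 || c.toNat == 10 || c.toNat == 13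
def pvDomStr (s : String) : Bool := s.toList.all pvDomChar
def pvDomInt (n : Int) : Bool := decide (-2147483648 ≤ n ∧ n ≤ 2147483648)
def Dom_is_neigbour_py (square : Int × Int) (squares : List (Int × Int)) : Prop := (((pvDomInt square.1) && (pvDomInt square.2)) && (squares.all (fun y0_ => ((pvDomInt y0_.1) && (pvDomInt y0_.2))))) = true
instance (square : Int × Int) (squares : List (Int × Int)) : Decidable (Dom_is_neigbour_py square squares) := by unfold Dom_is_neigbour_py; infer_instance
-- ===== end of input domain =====

-- B replaces A's staged comprehension scans with one pass over squares carrying four boolean flags and an early exit (objective: alternative).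


-- ===== PORT A =====
-- second 'if' block of A (reached when the first block does not return True)
def goSecond (square : Int × Int) (squares : List (Int × Int)) : Bool :=
  if (squares.map Prod.snd).contains square.2 then
    (squares.map Prod.fst).any (fun x => square.1 == x - 1 || square.1 == x + 1)
  else false

def is_neigbour_py (square : Int × Int) (squares : List (Int × Int)) : Bool :=
  if (squares.map Prod.fst).contains square.1 then
    if (squares.map Prod.snd).any (fun y => square.2 == y - 1 || square.2 == y + 1) then
      true
    else goSecond square squares
  else goSecond square squares

-- ===== PORT B =====
-- single pass with four flags and early exit, following Source B's loop
def altGo (x y : Int) : List (Int × Int) → Bool → Bool → Bool → Bool → Bool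
  | [], _, _, _, _ => false
  | s :: rest, xm, ym, xn, yn =>
    let xm' := xm || (s.1 == x)
    let ym' := ym || (s.2 == y)
    let xn' := xn || ((s.1 - x).natAbs == 1)
    let yn' := yn || ((s.2 - y).natAbs == 1)
    if (xm' && yn') || (ym' && xn') then true
    else altGo x y rest xm' ym' xn' yn'

def is_neigbour_py_alt (square : Int × Int) (squares : List (Int × Int)) : Bool :=
  altGo square.1 square.2 squares false false false false

-- ===== PRECONDITION & SPEC =====
def Spec_is_neigbour_py (square : Int × Int) (squares : List (Int × Int)) (out : Bool) : Prop := out = is_neigbour_py_alt square squares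
instance (square : Int × Int) (squares : List (Int × Int)) (out : Bool) : Decidable (Spec_is_neigbour_py square squares out) := by unfold Spec_is_neigbour_py; infer_instance

-- ===== CLAIM (what is proved, stated in full; the proofs are below) =====
def Claim_equal_is_neigbour_py : Prop := ∀ (square : Int × Int) (squares : List (Int × Int)), Dom_is_neigbour_py square squares → Spec_is_neigbour_py square squares (is_neigbour_py square squares)

-- ===== LEMMAS AND PROOFS =====
-- whole-list flags
def Xm (x : Int) (l : List (Int × Int)) : Bool := l.any (fun s => s.1 == x)
def Ym (y : Int) (l : List (Int × Int)) : Bool := l.any (fun s => s.2 == y)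
def Xn (x : Int) (l : List (Int × Int)) : Bool := l.any (fun s => (s.1 - x).natAbs == 1)
def Yn (y : Int) (l : List (Int × Int)) : Bool := l.any (fun s => (s.2 - y).natAbs == 1)

theorem altGo_eq (x y : Int) (l : List (Int × Int)) :
    ∀ xm ym xn yn, ((xm && yn) || (ym && xn)) = false →
      altGo x y l xm ym xn yn =
        (((xm || Xm x l) && (yn || Yn y l)) || ((ym || Ym y l) && (xn || Xn x l))) := by
  induction l with
  | nil => intro xm ym xn yn h; simp [altGo, Xm, Ym, Xn, Yn, h]
  | cons s rest ih =>
    intro xm ym xn yn h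
    simp only [altGo]
    split_ifs with hc
    · simp only [Xm, Ym, Xn, Yn, List.any_cons] at *
      rw [Bool.eq_iff_iff] at hc ⊢
      simp only [Bool.and_eq_true, Bool.or_eq_true] at hc ⊢
      tauto
    · rw [ih _ _ _ _ (by simpa using hc)]
      simp only [Xm, Ym, Xn, Yn, List.any_cons]
      rw [Bool.eq_iff_iff]
      simp only [Bool.and_eq_true, Bool.or_eq_true]
      tauto

theorem contains_fst_eq (x : Int) (l : List (Int × Int)) :
    (l.map Prod.fst).contains x = Xm x l := by
  rw [Bool.eq_iff_iff]
  simp only [Xm, List.contains_iff_mem, List.any_eq_true, List.mem_map, beq_iff_eq]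

theorem contains_snd_eq (y : Int) (l : List (Int × Int)) :
    (l.map Prod.snd).contains y = Ym y l := by
  rw [Bool.eq_iff_iff]
  simp only [Ym, List.contains_iff_mem, List.any_eq_true, List.mem_map, beq_iff_eq]

theorem any_snd_eq (b : Int) (l : List (Int × Int)) :
    ((l.map Prod.snd).any (fun y => b == y - 1 || b == y + 1)) = Yn b l := by
  rw [Bool.eq_iff_iff]
  simp only [Yn, List.any_map, List.any_eq_true, Function.comp, Bool.or_eq_true, beq_iff_eq]
  constructor
  · rintro ⟨s, hs, h⟩; exact ⟨s, hs, by omega⟩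
  · rintro ⟨s, hs, h⟩; exact ⟨s, hs, by omega⟩

theorem any_fst_eq (a : Int) (l : List (Int × Int)) :
    ((l.map Prod.fst).any (fun x => a == x - 1 || a == x + 1)) = Xn a l := by
  rw [Bool.eq_iff_iff]
  simp only [Xn, List.any_map, List.any_eq_true, Function.comp, Bool.or_eq_true, beq_iff_eq]
  constructor
  · rintro ⟨s, hs, h⟩; exact ⟨s, hs, by omega⟩
  · rintro ⟨s, hs, h⟩; exact ⟨s, hs, by omega⟩

-- ===== VERDICT (by name: the statement is the Claim_ definition above) =====
theorem is_neigbour_py_spec : Claim_equal_is_neigbour_py := by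
  intro square squares _
  unfold Spec_is_neigbour_py is_neigbour_py is_neigbour_py_alt goSecond
  rw [altGo_eq _ _ _ false false false false rfl]
  simp only [Bool.false_or]
  rw [contains_fst_eq, contains_snd_eq, any_snd_eq, any_fst_eq]
  cases Xm square.1 squares <;> cases Ym square.2 squares <;>
    cases Xn square.1 squares <;> cases Yn square.2 squares <;> simp
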